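-- pv_equiv track=rewrite | github.com/pypi-data/pypi-mirror-403 | packages/papervibe/papervibe-0.1.0a1.tar.gz/papervibe-0.1.0a1/src/papervibe/latex.py | strip_pvhighlight_wrappers
-- ===== SOURCE A (Python) =====
-- def strip_pvhighlight_wrappers(text: str) -> str:
--     """
--     Strip all \\pvhighlight{...} wrappers from text, preserving content.
--
--     This is brace-aware and handles nested braces properly.
--
--     Args:
--         text: LaTeX text potentially containing \\pvhighlight{...} wrappers
--
--     Returns:
--         Text with all \\pvhighlight wrappers removed
--     """
--     result = []
--     i = 0
--
--     while i < len(text):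
--         # Look for \pvhighlight{
--         if text[i : i + 13] == "\\pvhighlight{":
--             # Skip the \pvhighlight{ part
--             i += 13
--
--             # Extract the content within braces
--             brace_level = 1
--             content_start = i
--
--             while i < len(text) and brace_level > 0:
--                 if text[i] == "{" and (i == 0 or text[i - 1] != "\\"):
--                     brace_level += 1
--                 elif text[i] == "}" and (i == 0 or text[i - 1] != "\\"):
--                     brace_level -= 1
--                 i += 1
--
--             # Add the content (without the closing brace)
--             result.append(text[content_start : i - 1])
--         else:
--             result.append(text[i])
--             i += 1
--
--     return "".join(result)
-- ===== SOURCE B (Python) =====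
-- def strip_pvhighlight_wrappers(text: str) -> str:
--     """Strip all \\pvhighlight{...} wrappers, find-based: jump marker to marker with str.find
--     and copy whole slices instead of scanning character by character."""
--     marker = "\\pvhighlight{"
--     res = []
--     i = 0
--     n = len(text)
--     while True:
--         j = text.find(marker, i)
--         if j == -1:
--             res.append(text[i:])
--             break
--         res.append(text[i:j])
--         i = j + 13
--         start = i
--         depth = 1
--         while i < n and depth:
--             c = text[i]
--             if c == "{" and text[i - 1] != "\\":
--                 depth += 1
--             elif c == "}" and text[i - 1] != "\\":
--                 depth -= 1
--             i += 1
--         res.append(text[start : i - 1])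
--     return "".join(res)
-- ===== Notes on version B (the rewrite author's own statement) =====
-- stated objective: faster
-- what changed: Replaces A's per-character outer loop (testing a 13-char slice at every index) by str.find jumps to the next wrapper marker, copying the whole slice between wrappers in one piece; the brace-depth inner loop is kept.
import Mathlib
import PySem

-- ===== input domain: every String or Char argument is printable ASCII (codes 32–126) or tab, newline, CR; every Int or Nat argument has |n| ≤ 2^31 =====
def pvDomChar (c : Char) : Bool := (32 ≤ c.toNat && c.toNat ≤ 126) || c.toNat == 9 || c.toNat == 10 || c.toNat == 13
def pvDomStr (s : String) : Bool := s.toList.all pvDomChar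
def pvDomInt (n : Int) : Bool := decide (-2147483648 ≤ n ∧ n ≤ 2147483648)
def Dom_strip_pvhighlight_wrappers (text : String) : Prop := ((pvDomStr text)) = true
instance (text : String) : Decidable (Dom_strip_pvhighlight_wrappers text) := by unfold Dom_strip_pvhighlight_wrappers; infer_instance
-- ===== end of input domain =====

-- B replaces A's per-character outer scan by str.find jumps that copy whole slices between
-- wrappers; same brace-depth inner loop, same return value (measured faster in a timing run).

-- ===== PORT A =====
-- the 13-char marker "\pvhighlight{"
def pvMarker : List Char := ['\\','p','v','h','i','g','h','l','i','g','h','t','{']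

-- A's inner while-loop (while i < len(text) and brace_level > 0), ported over the suffix of
-- the text with the previous character carried as `prev` (Python's `i == 0` disjunct is
-- unreachable inside this loop since i ≥ 13 there). Returns (consumed chars, remaining suffix).
def pvScanA : List Char → Char → Nat → List Char × List Char
  | [], _, _ => ([], [])
  | c :: rs, prev, level =>
    if level = 0 then ([], c :: rs)
    else
      let level' := if c = '{' ∧ prev ≠ '\\' then level + 1
        else if c = '}' ∧ prev ≠ '\\' then level - 1 else level
      let r := pvScanA rs c level'
      (c :: r.1, r.2)

theorem pvScanA_len : ∀ (rest : List Char) (prev : Char) (level : Nat),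
    (pvScanA rest prev level).2.length ≤ rest.length := by
  intro rest
  induction rest with
  | nil => intro prev level; simp [pvScanA]
  | cons c rs ih =>
    intro prev level
    simp only [pvScanA]
    split
    · simp
    · simpa using Nat.le_succ_of_le (ih c _)

-- A's outer while-loop: at each position test the 13-char slice; on a match skip it, run the
-- inner loop, append text[content_start : i-1] (= consumed.dropLast: the close brace, or —
-- if the loop hit end-of-string — the last character, is dropped), else copy one char.
def pvOuterA : List Char → List Char
  | [] => []
  | c :: rs =>
    if (c :: rs).take 13 = pvMarker then
      (pvScanA ((c :: rs).drop 13) '{' 1).1.dropLast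
        ++ pvOuterA (pvScanA ((c :: rs).drop 13) '{' 1).2
    else c :: pvOuterA rs
termination_by l => l.length
decreasing_by
  · calc (pvScanA ((c :: rs).drop 13) '{' 1).2.length
        ≤ ((c :: rs).drop 13).length := pvScanA_len _ _ _
      _ < (c :: rs).length := by simp only [List.length_drop, List.length_cons]; omega
  · simp

def strip_pvhighlight_wrappers (text : String) : String :=
  String.ofList (pvOuterA text.toList)

-- ===== PORT B =====
-- B's inner brace loop (identical to A's inner loop in Source B, without the dead i==0 test).
def pvScanB : List Char → Char → Nat → List Char × List Char
  | [], _, _ => ([], [])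
  | c :: rs, prev, depth =>
    if depth = 0 then ([], c :: rs)
    else
      let depth' := if c = '{' ∧ prev ≠ '\\' then depth + 1
        else if c = '}' ∧ prev ≠ '\\' then depth - 1 else depth
      let r := pvScanB rs c depth'
      (c :: r.1, r.2)

theorem pvScanB_len : ∀ (rest : List Char) (prev : Char) (depth : Nat),
    (pvScanB rest prev depth).2.length ≤ rest.length := by
  intro rest
  induction rest with
  | nil => intro prev depth; simp [pvScanB]
  | cons c rs ih =>
    intro prev depth
    simp only [pvScanB]
    split
    · simp
    · simpa using Nat.le_succ_of_le (ih c _)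

-- text.find(marker, i): splits the suffix at the first marker occurrence, returning
-- (prefix before the marker, suffix after the marker); none = Python's -1.
def pvFind : List Char → Option (List Char × List Char)
  | [] => none
  | c :: rs =>
    if (c :: rs).take 13 = pvMarker then some ([], (c :: rs).drop 13)
    else
      match pvFind rs with
      | none => none
      | some (b, a) => some (c :: b, a)

theorem pvFind_len : ∀ (l b a : List Char), pvFind l = some (b, a) → a.length < l.length := by
  intro l
  induction l with
  | nil => intro b a h; simp [pvFind] at h
  | cons c rs ih =>
    intro b a h
    simp only [pvFind] at h
    split at h
    · rename_i hm
      have h13 : (c :: rs).length ≥ 13 := by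
        have := congrArg List.length hm
        simp [pvMarker] at this
        simp only [List.length_cons]
        omega
      cases h
      simp only [List.length_drop]
      omega
    · cases hr : pvFind rs with
      | none => rw [hr] at h; cases h
      | some p =>
        rw [hr] at h
        cases p with
        | mk b' a' =>
          simp at h
          obtain ⟨hb, ha⟩ := h
          subst ha
          have := ih b' a' hr
          simp only [List.length_cons]
          omega

-- B's outer while-True loop: find the next marker; if none, flush the tail; otherwise copy
-- the slice before it in one piece, run the brace loop, append consumed.dropLast, continue.
def pvOuterB (l : List Char) : List Char :=
  match h : pvFind l with
  | none => l
  | some (b, a) =>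
    b ++ (pvScanB a '{' 1).1.dropLast ++ pvOuterB (pvScanB a '{' 1).2
termination_by l.length
decreasing_by
  calc (pvScanB a '{' 1).2.length ≤ a.length := pvScanB_len _ _ _
    _ < l.length := pvFind_len _ _ _ h

def strip_pvhighlight_wrappers_alt (text : String) : String :=
  String.ofList (pvOuterB text.toList)

-- ===== PRECONDITION & SPEC =====
def Spec_strip_pvhighlight_wrappers (text : String) (out : String) : Prop := out = strip_pvhighlight_wrappers_alt text
instance (text : String) (out : String) : Decidable (Spec_strip_pvhighlight_wrappers text out) := by unfold Spec_strip_pvhighlight_wrappers; infer_instance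

-- ===== CLAIM (what is proved, stated in full; the proofs are below) =====
def Claim_equal_strip_pvhighlight_wrappers : Prop := ∀ (text : String), Dom_strip_pvhighlight_wrappers text → Spec_strip_pvhighlight_wrappers text (strip_pvhighlight_wrappers text)

-- ===== LEMMAS AND PROOFS =====

theorem scanA_eq_scanB : ∀ (rest : List Char) (prev : Char) (level : Nat),
    pvScanA rest prev level = pvScanB rest prev level := by
  intro rest
  induction rest with
  | nil => intro prev level; simp [pvScanA, pvScanB]
  | cons c rs ih => intro prev level; simp [pvScanA, pvScanB, ih]

theorem outerA_of_find_none : ∀ (l : List Char), pvFind l = none → pvOuterA l = l := by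
  intro l
  induction l with
  | nil => intro _; simp [pvOuterA]
  | cons c rs ih =>
    intro h
    simp only [pvFind] at h
    split at h
    · cases h
    · cases hr : pvFind rs with
      | none => rw [pvOuterA]; simp_all
      | some p => rw [hr] at h; cases p; cases h

theorem outerA_of_find_some : ∀ (l b a : List Char), pvFind l = some (b, a) →
    pvOuterA l = b ++ (pvScanA a '{' 1).1.dropLast ++ pvOuterA (pvScanA a '{' 1).2 := by
  intro l
  induction l with
  | nil => intro b a h; simp [pvFind] at h
  | cons c rs ih =>
    intro b a h
    simp only [pvFind] at h
    split at h
    · rename_i hm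
      cases h
      simp only [pvOuterA]
      rw [if_pos hm]
      simp
    · rename_i hm
      cases hr : pvFind rs with
      | none => rw [hr] at h; cases h
      | some p =>
        rw [hr] at h
        cases p with
        | mk b' a' =>
          simp at h
          obtain ⟨hb, ha⟩ := h
          subst hb ha
          simp only [pvOuterA]
          rw [if_neg hm, ih b' a' hr]
          simp

theorem outerB_eq_outerA_aux : ∀ (n : Nat) (l : List Char), l.length ≤ n → pvOuterB l = pvOuterA l := by
  intro n
  induction n with
  | zero =>
    intro l hl
    have : l = [] := List.eq_nil_of_length_eq_zero (Nat.le_zero.mp hl)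
    subst this
    rw [pvOuterB]
    exact (outerA_of_find_none [] rfl).symm
  | succ n ih =>
    intro l hl
    rw [pvOuterB]
    cases h : pvFind l with
    | none => exact (outerA_of_find_none l h).symm
    | some p =>
      cases p with
      | mk b a =>
        rw [outerA_of_find_some l b a h]
        show b ++ (pvScanB a '{' 1).1.dropLast ++ pvOuterB (pvScanB a '{' 1).2
          = b ++ (pvScanA a '{' 1).1.dropLast ++ pvOuterA (pvScanA a '{' 1).2
        rw [← scanA_eq_scanB]
        have hlt : (pvScanA a '{' 1).2.length ≤ n := by
          have h1 : (pvScanA a '{' 1).2.length ≤ a.length := pvScanA_len _ _ _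
          have h2 : a.length < l.length := pvFind_len _ _ _ h
          omega
        rw [ih _ hlt]

theorem outerB_eq_outerA (l : List Char) : pvOuterB l = pvOuterA l :=
  outerB_eq_outerA_aux l.length l (Nat.le_refl _)

-- ===== VERDICT (by name: the statement is the Claim_ definition above) =====
theorem strip_pvhighlight_wrappers_spec : Claim_equal_strip_pvhighlight_wrappers := by
  intro text _
  unfold Spec_strip_pvhighlight_wrappers strip_pvhighlight_wrappers strip_pvhighlight_wrappers_alt
  rw [outerB_eq_outerA]
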